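-- pv_equiv track=rewrite | github.com/uvm-neurobotics-lab/stitching | src/launch_scaling_experiments.py | conv3x3_with_downsample
-- ===== SOURCE A (Python) =====
-- def get_tensor_shape_sequence(src_format, dest_format, num_downsamples):
--     # Get the appropriate sequence of tensor shapes for N downsampling steps.
--     in_channels = src_format[1][0]
--     out_channels = dest_format[1][0]
--     in_size = src_format[1][1]
--     out_size = dest_format[1][1]
--     if out_channels >= in_channels:
--         channels = [min(in_channels * (2 ** i), out_channels) for i in range(max(num_downsamples + 1, 2))]
--     else:
--         channels = [max(in_channels // (2 ** i), out_channels) for i in range(max(num_downsamples + 1, 2))]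
--     sizes = [max(in_size // (2 ** i), out_size) for i in range(max(num_downsamples + 1, 2))]
--     # Ensure the final size is `dest_format`, in case the `num_downsamples` wasn't enough to get to the right size.
--     channels[-1] = out_channels
--     sizes[-1] = out_size
--     return channels, sizes
--
-- def conv3x3_with_downsample(src_format, dest_format, num_downsamples):
--     channels, sizes = get_tensor_shape_sequence(src_format, dest_format, num_downsamples)
--     # Use 1x1 convs if either input or output is in image-like format. Otherwise, use fully-connected layers.
--     conv_or_fc = "num_conv" if (src_format[0] in ("img", "bhwc") or dest_format[0] in ("img", "bhwc")) else "num_fc"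
--
--     parts = []
--     for ich, och, isz, osz in zip(channels, channels[1:], sizes, sizes[1:]):
--         stride = isz // osz
--         parts.append({
--             "SimpleAdapter": {
--                 conv_or_fc: 1,
--                 "kernel_size": 3,
--                 "stride": stride,
--                 "in_channels": ich,
--                 "out_channels": och,
--             }
--         })
--     return parts
-- ===== SOURCE B (Python) =====
-- def conv3x3_with_downsample(src_format, dest_format, num_downsamples):
--     # Streaming pass: carry the running (channel, size) state and halve/double it
--     # each step (clamping channels against the target on the fly), instead of
--     # materializing closed-form 2**i channel/size lists and zipping adjacent pairs.
--     in_channels, in_size = src_format[1]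
--     out_channels, out_size = dest_format[1]
--     conv_or_fc = "num_conv" if (src_format[0] in ("img", "bhwc") or dest_format[0] in ("img", "bhwc")) else "num_fc"
--     grow = out_channels >= in_channels
--
--     parts = []
--     ch, sz = in_channels, in_size
--     steps = max(num_downsamples + 1, 2) - 1
--     while steps > 0:
--         ich = ch
--         isz = max(sz, out_size)
--         ch = min(ch * 2, out_channels) if grow else max(ch // 2, out_channels)
--         sz //= 2
--         if steps == 1:
--             och, osz = out_channels, out_size
--         else:
--             och, osz = ch, max(sz, out_size)
--         parts.append({
--             "SimpleAdapter": {
--                 conv_or_fc: 1,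
--                 "kernel_size": 3,
--                 "stride": isz // osz,
--                 "in_channels": ich,
--                 "out_channels": och,
--             }
--         })
--         steps -= 1
--     return parts
-- ===== Notes on version B (the rewrite author's own statement) =====
-- stated objective: faster
-- what changed: B replaces A's staged construction (build two closed-form 2**i channel/size lists, overwrite their last entries, zip adjacent pairs) with a single streaming while-loop carrying a running (channel, size) state that is doubled/halved and clamped in place each iteration (target values overriding the final step); no lists, 2**i powers or zips, so intermediate integers stay bounded instead of growing to N-bit 2**i values.
import Mathlib
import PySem

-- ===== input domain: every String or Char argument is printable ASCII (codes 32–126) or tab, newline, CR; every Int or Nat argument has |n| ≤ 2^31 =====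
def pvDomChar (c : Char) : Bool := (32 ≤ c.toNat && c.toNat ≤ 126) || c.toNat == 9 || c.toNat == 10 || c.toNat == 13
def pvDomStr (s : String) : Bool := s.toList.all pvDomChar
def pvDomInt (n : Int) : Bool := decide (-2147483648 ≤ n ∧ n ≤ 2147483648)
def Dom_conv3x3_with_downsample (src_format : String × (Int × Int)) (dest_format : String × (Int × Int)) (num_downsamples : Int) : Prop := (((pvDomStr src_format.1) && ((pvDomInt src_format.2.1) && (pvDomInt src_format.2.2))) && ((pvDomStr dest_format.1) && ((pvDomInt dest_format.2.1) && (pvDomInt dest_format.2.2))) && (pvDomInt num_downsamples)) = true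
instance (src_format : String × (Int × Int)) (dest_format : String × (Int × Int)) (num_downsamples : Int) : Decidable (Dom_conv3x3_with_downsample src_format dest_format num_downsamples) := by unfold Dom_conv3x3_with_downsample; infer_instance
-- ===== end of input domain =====

-- B replaces A's closed-form 2**i channel/size lists (built, last-overridden, then
-- zipped pairwise) with one streaming while-loop carrying a running (channel, size)
-- state, doubled/halved and clamped in place each step; objective: faster (B avoids
-- the growing 2**i bignums, measurably faster on large num_downsamples).

-- ===== PORT A =====
-- literal port of get_tensor_shape_sequence + conv3x3_with_downsample;
-- 2 ** i is ported as 2 ^ i.toNat (exact: i comes from range(...), so 0 ≤ i);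
-- channels[-1] = … is ported as .set (length - 1) (exact: the lists have length ≥ 2)
def conv3x3_with_downsample (src_format : String × (Int × Int)) (dest_format : String × (Int × Int)) (num_downsamples : Int) : List (List (String × List (String × Int))) :=
  let in_channels := src_format.2.1
  let out_channels := dest_format.2.1
  let in_size := src_format.2.2
  let out_size := dest_format.2.2
  let r := PySem.List.pyRange 0 (max (num_downsamples + 1) 2) 1
  let channels :=
    if out_channels ≥ in_channels then
      r.map (fun i => min (in_channels * 2 ^ i.toNat) out_channels)
    else
      r.map (fun i => max (PySem.Int.floordiv in_channels (2 ^ i.toNat)) out_channels)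
  let sizes := r.map (fun i => max (PySem.Int.floordiv in_size (2 ^ i.toNat)) out_size)
  let channels := channels.set (channels.length - 1) out_channels
  let sizes := sizes.set (sizes.length - 1) out_size
  let conv_or_fc :=
    if src_format.1 = "img" ∨ src_format.1 = "bhwc" ∨ dest_format.1 = "img" ∨ dest_format.1 = "bhwc"
    then "num_conv" else "num_fc"
  ((channels.zip (PySem.List.slice channels (some 1) none)).zip
      (sizes.zip (PySem.List.slice sizes (some 1) none))).foldl
    (fun parts q =>
      let stride := PySem.Int.floordiv q.2.1 q.2.2
      parts ++ [[("SimpleAdapter",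
        [(conv_or_fc, 1), ("kernel_size", 3), ("stride", stride),
         ("in_channels", q.1.1), ("out_channels", q.1.2)])]])
    []

-- ===== PORT B =====
-- the while loop of Source B: countdown on `steps`, carrying the running clamped
-- channel `ch` and raw size `sz`, appending one adapter per iteration
def pvGo (cfc : String) (oc os : Int) (grow : Bool) :
    Nat → Int → Int → List (List (String × List (String × Int))) → List (List (String × List (String × Int)))
  | 0, _, _, parts => parts
  | steps + 1, ch, sz, parts =>
    let ich := ch
    let isz := max sz os
    let ch' := if grow then min (ch * 2) oc else max (PySem.Int.floordiv ch 2) oc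
    let sz' := PySem.Int.floordiv sz 2
    let och := if steps = 0 then oc else ch'
    let osz := if steps = 0 then os else max sz' os
    pvGo cfc oc os grow steps ch' sz'
      (parts ++ [[("SimpleAdapter",
        [(cfc, 1), ("kernel_size", 3), ("stride", PySem.Int.floordiv isz osz),
         ("in_channels", ich), ("out_channels", och)])]])

def conv3x3_with_downsample_alt (src_format : String × (Int × Int)) (dest_format : String × (Int × Int)) (num_downsamples : Int) : List (List (String × List (String × Int))) :=
  let in_channels := src_format.2.1
  let in_size := src_format.2.2
  let out_channels := dest_format.2.1
  let out_size := dest_format.2.2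
  let conv_or_fc :=
    if src_format.1 = "img" ∨ src_format.1 = "bhwc" ∨ dest_format.1 = "img" ∨ dest_format.1 = "bhwc"
    then "num_conv" else "num_fc"
  let grow := decide (out_channels ≥ in_channels)
  pvGo conv_or_fc out_channels out_size grow
    (max (num_downsamples + 1) 2 - 1).toNat in_channels in_size []

-- ===== PRECONDITION & SPEC =====
-- Pre_ excludes exactly the inputs on which A raises ZeroDivisionError in `isz // osz`:
-- out_size = 0, or out_size < 0 while some intermediate size max(in_size // 2**j, out_size)
-- (1 ≤ j ≤ num_downsamples - 1) is 0, i.e. 0 ≤ in_size < 2**(num_downsamples - 1).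
def Pre_conv3x3_with_downsample (src_format : String × (Int × Int)) (dest_format : String × (Int × Int)) (num_downsamples : Int) : Prop :=
  dest_format.2.2 ≠ 0 ∧
    (0 < dest_format.2.2 ∨ src_format.2.2 < 0 ∨ num_downsamples ≤ 1 ∨
      2 ^ (num_downsamples - 1).toNat ≤ src_format.2.2)
instance (src_format : String × (Int × Int)) (dest_format : String × (Int × Int)) (num_downsamples : Int) : Decidable (Pre_conv3x3_with_downsample src_format dest_format num_downsamples) := by unfold Pre_conv3x3_with_downsample; infer_instance

def pvWitness_conv3x3_with_downsample : (String × (Int × Int)) × (String × (Int × Int)) × Int :=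
  (("img", (3, 32)), ("vec", (8, 4)), 3)

def Spec_conv3x3_with_downsample (src_format : String × (Int × Int)) (dest_format : String × (Int × Int)) (num_downsamples : Int) (out : List (List (String × List (String × Int)))) : Prop := out = conv3x3_with_downsample_alt src_format dest_format num_downsamples
instance (src_format : String × (Int × Int)) (dest_format : String × (Int × Int)) (num_downsamples : Int) (out : List (List (String × List (String × Int)))) : Decidable (Spec_conv3x3_with_downsample src_format dest_format num_downsamples out) := by unfold Spec_conv3x3_with_downsample; infer_instance

-- ===== CLAIM (what is proved, stated in full; the proofs are below) =====
def Claim_equal_conv3x3_with_downsample : Prop := ∀ (src_format : String × (Int × Int)) (dest_format : String × (Int × Int)) (num_downsamples : Int), Dom_conv3x3_with_downsample src_format dest_format num_downsamples → Pre_conv3x3_with_downsample src_format dest_format num_downsamples → Spec_conv3x3_with_downsample src_format dest_format num_downsamples (conv3x3_with_downsample src_format dest_format num_downsamples)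

-- ===== LEMMAS AND PROOFS =====

lemma pv_set_map_range {α : Type} (M j : Nat) (f : Nat → α) (v : α) :
    ((List.range M).map f).set j v = (List.range M).map (fun k => if k = j then v else f k) := by
  apply List.ext_getElem
  · simp
  · intro i h1 h2
    simp only [List.getElem_set, List.getElem_map, List.getElem_range]
    by_cases h : j = i
    · simp [h]
    · simp [h]
      exact fun hh => absurd hh.symm h

lemma pv_zip_tail_map_range {α : Type} (M : Nat) (p : Nat → α) :
    (((List.range M).map p).zip ((List.range M).map p).tail)
      = (List.range (M - 1)).map (fun k => (p k, p (k + 1))) := by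
  apply List.ext_getElem
  · simp [List.length_zip, List.length_tail]
  · intro i h1 h2
    simp [List.getElem_zip, List.getElem_tail]

-- one unrolling of the while loop equals one prepended adapter on the range-map form
lemma pvGo_spec (cfc : String) (oc os : Int) (grow : Bool) (f g : Nat → Int)
    (hf : ∀ k, (if grow then min (f k * 2) oc else max (PySem.Int.floordiv (f k) 2) oc) = f (k + 1))
    (hg : ∀ k, PySem.Int.floordiv (g k) 2 = g (k + 1)) :
    ∀ (m k : Nat) (parts : List (List (String × List (String × Int)))),
    pvGo cfc oc os grow m (f k) (g k) parts
      = parts ++ (List.range m).map (fun j =>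
          [("SimpleAdapter",
            [(cfc, 1), ("kernel_size", 3),
             ("stride", PySem.Int.floordiv (max (g (k + j)) os)
                (if j = m - 1 then os else max (g (k + j + 1)) os)),
             ("in_channels", f (k + j)),
             ("out_channels", if j = m - 1 then oc else f (k + j + 1))])]) := by
  intro m
  induction m with
  | zero => intro k parts; simp [pvGo]
  | succ m ih =>
    intro k parts
    rw [pvGo]
    simp only [hf k, hg k]
    rw [ih (k + 1)]
    rw [List.append_assoc]
    congr 1
    rw [List.range_succ_eq_map]
    simp only [List.map_cons, List.map_map, List.singleton_append, Nat.add_succ_sub_one]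
    congr 1
    · by_cases hm : m = 0 <;> simp [hm, eq_comm]
    · apply List.map_congr_left
      intro j hj
      simp only [List.mem_range] at hj
      have h1 : k + 1 + j = k + (j + 1) := by omega
      have h2 : k + 1 + j + 1 = k + (j + 1) + 1 := by omega
      have h3 : (j + 1 = m) ↔ (j = m - 1) := by omega
      simp only [Function.comp, h1]
      by_cases hl : j + 1 = m
      · have hm : m - 1 + 1 = m := by omega
        simp [h3.mp hl, hm]
      · have hl' : ¬ j = m - 1 := by omega
        simp [hl', hl]

-- the clamped channel recurrence reproduces the grow-branch closed form
lemma pv_chan_grow (ic oc : Int) (h : ic ≤ oc) (k : Nat) :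
    min (min (ic * 2 ^ k) oc * 2) oc = min (ic * 2 ^ (k + 1)) oc := by
  have hp : (1 : Int) ≤ 2 ^ k := one_le_pow₀ (by norm_num)
  have hpow : ic * 2 ^ (k + 1) = ic * 2 ^ k * 2 := by ring
  rcases le_or_gt (ic * 2 ^ k) oc with hx | hx
  · rw [min_eq_left hx, hpow]
  · -- ic * 2^k > oc forces 0 ≤ oc (else ic ≤ oc < 0 gives ic * 2^k ≤ ic ≤ oc)
    have hoc : 0 ≤ oc := by
      by_contra hneg
      have hic : ic ≤ 0 := by omega
      nlinarith
    rw [min_eq_right (le_of_lt hx), hpow]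
    omega

-- the clamped channel recurrence reproduces the shrink-branch closed form
lemma pv_chan_shrink (ic oc : Int) (h : oc < ic) (k : Nat) :
    max (PySem.Int.floordiv (max (PySem.Int.floordiv ic (2 ^ k)) oc) 2) oc
      = max (PySem.Int.floordiv ic (2 ^ (k + 1))) oc := by
  have h2k : (0 : Int) < 2 ^ k := by positivity
  have h2k1 : (0 : Int) < 2 ^ (k + 1) := by positivity
  rw [PySem.Int.floordiv_eq_ediv_of_pos h2k, PySem.Int.floordiv_eq_ediv_of_pos h2k1]
  have hcomp : ic / 2 ^ k / 2 = ic / 2 ^ (k + 1) := by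
    rw [Int.ediv_ediv_of_nonneg (by positivity)]
    norm_num [pow_succ]
  set a := ic / 2 ^ k with ha
  have haoc : oc < 0 → oc ≤ a := by
    intro hneg
    rcases le_or_gt 0 ic with hic | hic
    · have : 0 ≤ a := Int.ediv_nonneg hic (le_of_lt h2k)
      omega
    · have : ic ≤ a := by
        rw [ha, Int.le_ediv_iff_mul_le h2k]
        nlinarith
      omega
  rcases le_or_gt oc a with hx | hx
  · rw [max_eq_left hx, PySem.Int.floordiv_eq_ediv_of_pos (by norm_num : (0:Int) < 2), hcomp]
  · have hoc : 0 ≤ oc := by by_contra hneg; exact absurd (haoc (by omega)) (by omega)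
    rw [max_eq_right (le_of_lt hx), PySem.Int.floordiv_eq_ediv_of_pos (by norm_num : (0:Int) < 2), ← hcomp]
    omega

-- the raw size recurrence reproduces the closed form
lemma pv_size_step (s : Int) (k : Nat) :
    PySem.Int.floordiv (PySem.Int.floordiv s (2 ^ k)) 2 = PySem.Int.floordiv s (2 ^ (k + 1)) := by
  rw [PySem.Int.floordiv_eq_ediv_of_pos (by positivity : (0:Int) < 2 ^ k),
      PySem.Int.floordiv_eq_ediv_of_pos (by norm_num : (0:Int) < 2),
      PySem.Int.floordiv_eq_ediv_of_pos (by positivity : (0:Int) < 2 ^ (k + 1)),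
      Int.ediv_ediv_of_nonneg (by positivity)]
  norm_num [pow_succ]

lemma pv_floordiv_one (a : Int) : PySem.Int.floordiv a 1 = a := by
  rw [PySem.Int.floordiv_eq_ediv_of_pos (by norm_num : (0:Int) < 1)]
  exact Int.ediv_one a

theorem pv_ports_eq (src_format : String × (Int × Int)) (dest_format : String × (Int × Int)) (num_downsamples : Int) :
    conv3x3_with_downsample src_format dest_format num_downsamples
      = conv3x3_with_downsample_alt src_format dest_format num_downsamples := by
  have hN : (2:Int) ≤ max (num_downsamples + 1) 2 := le_max_right _ _
  have hM2 : 2 ≤ (max (num_downsamples + 1) 2).toNat := by omega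
  have hMN : max (num_downsamples + 1) 2 = ((max (num_downsamples + 1) 2).toNat : Int) := by omega
  have hMN1 : (max (num_downsamples + 1) 2 - 1).toNat = (max (num_downsamples + 1) 2).toNat - 1 := by omega
  rw [conv3x3_with_downsample, conv3x3_with_downsample_alt, hMN1, hMN]
  generalize (max (num_downsamples + 1) 2).toNat = M at hM2
  simp only [PySem.List.pyRange_one, PySem.List.slice_from_one, Int.sub_zero, zero_add,
    List.length_map, List.length_range, Int.toNat_natCast, List.map_map]
  by_cases hc : dest_format.2.1 ≥ src_format.2.1
  · have hB := pvGo_spec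
      (if src_format.1 = "img" ∨ src_format.1 = "bhwc" ∨ dest_format.1 = "img" ∨ dest_format.1 = "bhwc"
        then "num_conv" else "num_fc")
      dest_format.2.1 dest_format.2.2 true
      (fun k => min (src_format.2.1 * 2 ^ k) dest_format.2.1)
      (fun k => PySem.Int.floordiv src_format.2.2 (2 ^ k))
      (fun k => by simpa using pv_chan_grow _ _ hc k)
      (fun k => pv_size_step _ k) (M - 1) 0 []
    simp only [Nat.zero_add, pow_zero, mul_one, pv_floordiv_one,
      min_eq_left hc, List.nil_append] at hB
    simp only [hc, if_true, decide_true,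
      pv_set_map_range, pv_zip_tail_map_range, List.zip_map',
      List.map_map, PySem.List.foldl_append_singleton_eq_map, List.nil_append,
      List.length_map, List.length_range, hB]
    apply List.map_congr_left
    intro k hk
    simp only [List.mem_range] at hk
    have hne : ¬ (k = M - 1) := by omega
    have hts : ((k:Int) + 1).toNat = k + 1 := by omega
    have h4 : ¬ (M - 1 - 1 = M - 1) := by omega
    have h5 : M - 1 - 1 + 1 = M - 1 := by omega
    by_cases hl : k + 1 = M - 1
    · have hl2 : k = M - 1 - 1 := by omega
      simp [hl2, h4, h5]
    · have hl2 : ¬ (k = M - 1 - 1) := by omega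
      simp [hne, hl, hl2]
  · have hlt : dest_format.2.1 < src_format.2.1 := not_le.mp hc
    have hB := pvGo_spec
      (if src_format.1 = "img" ∨ src_format.1 = "bhwc" ∨ dest_format.1 = "img" ∨ dest_format.1 = "bhwc"
        then "num_conv" else "num_fc")
      dest_format.2.1 dest_format.2.2 false
      (fun k => max (PySem.Int.floordiv src_format.2.1 (2 ^ k)) dest_format.2.1)
      (fun k => PySem.Int.floordiv src_format.2.2 (2 ^ k))
      (fun k => by simpa using pv_chan_shrink _ _ hlt k)
      (fun k => pv_size_step _ k) (M - 1) 0 []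
    simp only [Nat.zero_add, pow_zero, pv_floordiv_one,
      max_eq_left (le_of_lt hlt), List.nil_append] at hB
    simp only [hc, if_false, decide_false,
      pv_set_map_range, pv_zip_tail_map_range, List.zip_map',
      List.map_map, PySem.List.foldl_append_singleton_eq_map, List.nil_append,
      List.length_map, List.length_range, hB]
    apply List.map_congr_left
    intro k hk
    simp only [List.mem_range] at hk
    have hne : ¬ (k = M - 1) := by omega
    have hts : ((k:Int) + 1).toNat = k + 1 := by omega
    have h4 : ¬ (M - 1 - 1 = M - 1) := by omega
    have h5 : M - 1 - 1 + 1 = M - 1 := by omega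
    by_cases hl : k + 1 = M - 1
    · have hl2 : k = M - 1 - 1 := by omega
      simp [hl2, h4, h5]
    · have hl2 : ¬ (k = M - 1 - 1) := by omega
      simp [hne, hl, hl2]

-- ===== VERDICT (by name: the statement is the Claim_ definition above) =====
theorem conv3x3_with_downsample_spec : Claim_equal_conv3x3_with_downsample := by
  intro src dest nd _ _
  unfold Spec_conv3x3_with_downsample
  exact pv_ports_eq src dest nd
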